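-- pv_equiv track=rewrite | github.com/himansaha7/small-strong-epsilon-net | MtechProjE2Square.py | findMaxSquare
-- ===== SOURCE A (Python) =====
-- def findMaxSquare(lst, arm):
--     # sort the list in ascending order
--     lst.sort()
--
--     # if no element in the list return 0 or if arm length is nil return 0
--     if not lst or (arm < 1):
--         return 0
--
--     # now take two pointer approach, one pointer will hold the address of left most elements under consideration and another pointer will keep proceeding right until the duration
--     # goes beyond the length of arm.
--
--     i = j = 0
--     max = 0
--     # iterate over all the elements in the list
--     while j < len(lst):
--         # arm is length of the arm of square, difference between two points must be less than the length of arm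
--         if lst[j] - lst[i] < arm:
--             j += 1
--         else:
--             if (j - i) > max:
--                 max = j - i
--             i += 1
--
--     if (j - i) > max:
--         max = j - i
--
--     return max
-- ===== SOURCE B (Python) =====
-- def _bisect_left(a, x):
--     # first index in sorted a whose value is >= x (hand-rolled bisect_left)
--     lo, hi = 0, len(a)
--     while lo < hi:
--         mid = (lo + hi) // 2
--         if a[mid] < x:
--             lo = mid + 1
--         else:
--             hi = mid
--     return lo
--
--
-- def findMaxSquare(lst, arm):
--     # sort the list in ascending order (in place, like the original)
--     lst.sort()
--
--     if not lst or arm < 1: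
--         return 0
--
--     # for each left endpoint i, binary-search the first index whose value
--     # is >= lst[i] + arm; the window [i, that index) fits inside the arm
--     best = 0
--     for i, v in enumerate(lst):
--         size = _bisect_left(lst, v + arm) - i
--         if size > best:
--             best = size
--     return best
-- ===== Notes on version B (the rewrite author's own statement) =====
-- stated objective: alternative
-- what changed: Replaces the two-pointer sliding-window scan with a per-element hand-written binary search (bisect_left) into the sorted list, taking the max window size over all left endpoints.
import Mathlib
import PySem

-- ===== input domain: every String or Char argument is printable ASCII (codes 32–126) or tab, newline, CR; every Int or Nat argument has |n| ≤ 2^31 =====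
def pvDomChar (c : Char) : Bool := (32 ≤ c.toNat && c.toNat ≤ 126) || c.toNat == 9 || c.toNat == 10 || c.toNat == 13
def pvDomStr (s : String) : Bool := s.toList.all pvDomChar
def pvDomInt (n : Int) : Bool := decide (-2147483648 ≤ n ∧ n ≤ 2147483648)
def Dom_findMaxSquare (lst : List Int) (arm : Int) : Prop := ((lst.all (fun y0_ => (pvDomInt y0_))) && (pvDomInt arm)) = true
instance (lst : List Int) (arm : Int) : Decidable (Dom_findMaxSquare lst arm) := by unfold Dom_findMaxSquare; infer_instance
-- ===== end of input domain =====

-- B replaces A's two-pointer scan with a per-left-endpoint binary search into the sorted list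
-- (alternative algorithm, same asymptotic cost up to a log factor). Both Pythons sort `lst` in
-- place; the equivalence proved here is about the RETURN value (both perform the same mutation).

-- ===== PORT A =====
-- A's while loop: each iteration advances i or j by one; `fuel` only makes the recursion total
-- (fuel 2*len+1 is never exhausted when arm ≥ 1, the only case in which the loop is entered).
-- Indexing `lst[j]`/`lst[i]` is always in range in A's loop; `.getD 0` only totalizes it.
def findMaxSquareLoop (s : List Int) (arm : Int) : Nat → Nat → Nat → Int → Int
  | 0, i, j, m => if ((j : Int) - i) > m then (j : Int) - i else m
  | fuel + 1, i, j, m =>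
    if j < s.length then
      if (PySem.List.pyGet? s (j : Int)).getD 0 - (PySem.List.pyGet? s (i : Int)).getD 0 < arm then
        findMaxSquareLoop s arm fuel i (j + 1) m
      else
        findMaxSquareLoop s arm fuel (i + 1) j (if ((j : Int) - i) > m then (j : Int) - i else m)
    else
      if ((j : Int) - i) > m then (j : Int) - i else m

def findMaxSquare (lst : List Int) (arm : Int) : Int :=
  let s := PySem.List.sorted lst (fun x => x)
  if s = [] ∨ arm < 1 then 0
  else findMaxSquareLoop s arm (2 * s.length + 1) 0 0 0

-- ===== PORT B =====
-- hand-written bisect_left of Source B, step for step (`.getD 0` only totalizes the in-range access)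
def bisectLeftB (a : List Int) (x : Int) (lo hi : Nat) : Nat :=
  if _h : lo < hi then
    let mid := (lo + hi) / 2
    if (PySem.List.pyGet? a (mid : Int)).getD 0 < x then bisectLeftB a x (mid + 1) hi
    else bisectLeftB a x lo mid
  else lo
termination_by hi - lo
decreasing_by all_goals omega

def findMaxSquare_alt (lst : List Int) (arm : Int) : Int :=
  let s := PySem.List.sorted lst (fun x => x)
  if s = [] ∨ arm < 1 then 0
  else
    (PySem.List.enumerate s).foldl
      (fun best p =>
        let size : Int := (bisectLeftB s (p.2 + arm) 0 s.length : Int) - p.1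
        if size > best then size else best) 0

-- ===== PRECONDITION & SPEC =====
def Spec_findMaxSquare (lst : List Int) (arm : Int) (out : Int) : Prop := out = findMaxSquare_alt lst arm
instance (lst : List Int) (arm : Int) (out : Int) : Decidable (Spec_findMaxSquare lst arm out) := by unfold Spec_findMaxSquare; infer_instance

-- ===== CLAIM (what is proved, stated in full; the proofs are below) =====
def Claim_equal_findMaxSquare : Prop := ∀ (lst : List Int) (arm : Int), Dom_findMaxSquare lst arm → Spec_findMaxSquare lst arm (findMaxSquare lst arm)

-- ===== LEMMAS AND PROOFS =====

-- max over left endpoints k ≥ i of the window size bisect(s[k]+arm) - k (0 once i ≥ length)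
def rmax (s : List Int) (arm : Int) (i : Nat) : Int :=
  if h : i < s.length then
    max ((bisectLeftB s (s[i] + arm) 0 s.length : Int) - i) (rmax s arm (i + 1))
  else 0
termination_by s.length - i

-- sortedness as an indexed fact
theorem sorted_getElem_le {s : List Int} (hs : s.Pairwise (· ≤ ·)) {k l : Nat}
    (hkl : k ≤ l) (hl : l < s.length) : s[k]'(by omega) ≤ s[l] := by
  rcases Nat.eq_or_lt_of_le hkl with rfl | h
  · exact le_refl _
  · exact (List.pairwise_iff_getElem.mp hs) k l (by omega) hl h

theorem pyGetD_idx {s : List Int} {k : Nat} (hk : k < s.length) :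
    (PySem.List.pyGet? s (k : Int)).getD 0 = s[k] := by
  simp [PySem.List.pyGet?_natCast, List.getElem?_eq_getElem hk]

-- binary-search invariant: bisectLeftB returns the first index of the sorted list ≥ x
theorem bisectLeftB_inv {s : List Int} (hs : s.Pairwise (· ≤ ·)) (x : Int) :
    ∀ d lo hi, hi - lo ≤ d → lo ≤ hi → hi ≤ s.length →
    (∀ k, k < lo → ∀ hk : k < s.length, s[k] < x) →
    (∀ k, hi ≤ k → ∀ hk : k < s.length, x ≤ s[k]) →
    bisectLeftB s x lo hi ≤ s.length ∧
      (∀ k, k < bisectLeftB s x lo hi → ∀ hk : k < s.length, s[k] < x) ∧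
      (∀ k, bisectLeftB s x lo hi ≤ k → ∀ hk : k < s.length, x ≤ s[k]) := by
  intro d
  induction d with
  | zero =>
    intro lo hi hd hlh hhn hlow hhigh
    rw [bisectLeftB]
    simp only [dif_neg (by omega : ¬ lo < hi)]
    refine ⟨by omega, hlow, fun k hk hk' => hhigh k (by omega) hk'⟩
  | succ d ih =>
    intro lo hi hd hlh hhn hlow hhigh
    rw [bisectLeftB]
    by_cases hlt : lo < hi
    · simp only [dif_pos hlt]
      have hmidn : (lo + hi) / 2 < s.length := by omega
      rw [pyGetD_idx hmidn]
      by_cases hc : s[(lo + hi) / 2] < x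
      · simp only [if_pos hc]
        exact ih ((lo + hi) / 2 + 1) hi (by omega) (by omega) hhn
          (fun k hk hk' => lt_of_le_of_lt (sorted_getElem_le hs (by omega) hmidn) hc) hhigh
      · simp only [if_neg hc]
        exact ih lo ((lo + hi) / 2) (by omega) (by omega) (by omega) hlow
          (fun k hk hk' => le_trans (le_of_not_gt hc) (sorted_getElem_le hs (by omega) hk'))
    · simp only [dif_neg hlt]
      refine ⟨by omega, hlow, fun k hk hk' => hhigh k (by omega) hk'⟩

theorem bisectLeftB_spec {s : List Int} (hs : s.Pairwise (· ≤ ·)) (x : Int) :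
    bisectLeftB s x 0 s.length ≤ s.length ∧
      (∀ k, k < bisectLeftB s x 0 s.length → ∀ hk : k < s.length, s[k] < x) ∧
      (∀ k, bisectLeftB s x 0 s.length ≤ k → ∀ hk : k < s.length, x ≤ s[k]) :=
  bisectLeftB_inv hs x s.length 0 s.length (by omega) (by omega) le_rfl
    (fun k hk _ => absurd hk (by omega)) (fun k hk hk' => absurd hk (by omega))

-- rmax is bounded by the remaining length
theorem rmax_le {s : List Int} (hs : s.Pairwise (· ≤ ·)) (arm : Int) :
    ∀ d i, s.length - i = d → i ≤ s.length → rmax s arm i ≤ (s.length : Int) - i := by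
  intro d
  induction d with
  | zero =>
    intro i hd hi
    rw [rmax]; simp only [dif_neg (by omega : ¬ i < s.length)]; omega
  | succ d ih =>
    intro i hd hi
    have hin : i < s.length := by omega
    rw [rmax]
    simp only [dif_pos hin]
    have h2 := ih (i + 1) (by omega) (by omega)
    have : (bisectLeftB s (s[i] + arm) 0 s.length : Int) - i ≤ (s.length : Int) - i := by
      have := (bisectLeftB_spec hs (s[i] + arm)).1
      omega
    omega

-- the A-side loop computes max m (rmax i), under the two-pointer invariants
theorem loop_eq {s : List Int} (hs : s.Pairwise (· ≤ ·)) {arm : Int} (harm : 1 ≤ arm) :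
    ∀ fuel i j m, i ≤ j → j ≤ s.length →
    (∀ k, k < j → ∀ hk : k < s.length, ∀ hi : i < s.length, s[k] < s[i] + arm) →
    (s.length - i) + (s.length - j) < fuel →
    findMaxSquareLoop s arm fuel i j m = max m (rmax s arm i) := by
  intro fuel
  induction fuel with
  | zero => intro i j m _ _ _ hf; omega
  | succ fuel ih =>
    intro i j m hij hjn hinv hf
    rw [findMaxSquareLoop]
    by_cases hjlt : j < s.length
    · simp only [if_pos hjlt]
      have hin : i < s.length := by omega
      rw [pyGetD_idx hjlt, pyGetD_idx hin]
      by_cases hc : s[j] - s[i] < arm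
      · simp only [if_pos hc]
        refine ih i (j + 1) m (by omega) hjlt (fun k hk hk' hi' => ?_) (by omega)
        rcases Nat.lt_or_ge k j with h | h
        · exact hinv k h hk' hi'
        · have : k = j := by omega
          subst this; omega
      · simp only [if_neg hc]
        -- here j is exactly the first index with s[j] ≥ s[i] + arm
        have hneq : i ≠ j := by
          intro h; subst h; omega
        have hblj : bisectLeftB s (s[i] + arm) 0 s.length = j := by
          obtain ⟨hb1, hb2, hb3⟩ := bisectLeftB_spec hs (s[i] + arm)
          by_contra hne
          rcases Nat.lt_or_ge (bisectLeftB s (s[i] + arm) 0 s.length) j with h | h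
          · exact absurd (hinv _ h (by omega) hin) (not_lt.mpr (hb3 _ le_rfl (by omega)))
          · have : j < bisectLeftB s (s[i] + arm) 0 s.length := by omega
            have := hb2 j this hjlt
            omega
        have hnext := ih (i + 1) j (if ((j : Int) - i) > m then (j : Int) - i else m)
          (by omega) hjn (fun k hk hk' hi' => lt_of_lt_of_le (hinv k hk hk' hin)
            (by have := sorted_getElem_le hs (by omega : i ≤ i + 1) hi'; omega)) (by omega)
        rw [hnext]
        conv_rhs => rw [rmax]
        simp only [dif_pos hin, hblj]
        simp only [max_def]
        split_ifs <;> omega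
    · simp only [if_neg hjlt]
      have hjn' : j = s.length := by omega
      subst hjn'
      by_cases hin : i < s.length
      · -- all remaining windows end at the list end: rmax i = length - i
        have hbli : bisectLeftB s (s[i] + arm) 0 s.length = s.length := by
          obtain ⟨hb1, hb2, hb3⟩ := bisectLeftB_spec hs (s[i] + arm)
          by_contra hne
          have hlt : bisectLeftB s (s[i] + arm) 0 s.length < s.length := by omega
          have := hb3 _ le_rfl hlt
          have := hinv _ hlt hlt hin
          omega
        have hri : rmax s arm i = (s.length : Int) - i := by
          rw [rmax]
          simp only [dif_pos hin, hbli]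
          have := rmax_le hs arm (s.length - (i + 1)) (i + 1) rfl (by omega)
          simp only [max_def]
          split_ifs <;> omega
        rw [hri]
        simp only [max_def]
        split_ifs <;> omega
      · have : i = s.length := by omega
        subst this
        rw [rmax]
        simp only [dif_neg (by omega : ¬ s.length < s.length)]
        simp only [max_def]
        split_ifs <;> omega

-- the B-side fold over the enumerated suffix computes max b (rmax i)
theorem fold_eq {s : List Int} (arm : Int) :
    ∀ d i (b : Int), s.length - i = d → i ≤ s.length → 0 ≤ b →
    List.foldl
      (fun best p =>
        let size : Int := (bisectLeftB s (p.2 + arm) 0 s.length : Int) - p.1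
        if size > best then size else best) b
      (PySem.List.enumerate (s.drop i) (i : Int)) = max b (rmax s arm i) := by
  intro d
  induction d with
  | zero =>
    intro i b hd hi hb
    have : i = s.length := by omega
    subst this
    rw [rmax]
    simp only [List.drop_length, PySem.List.enumerate_nil, List.foldl_nil,
      dif_neg (by omega : ¬ s.length < s.length)]
    simp only [max_def]
    split_ifs <;> omega
  | succ d ih =>
    intro i b hd hi hb
    have hin : i < s.length := by omega
    rw [List.drop_eq_getElem_cons hin, PySem.List.enumerate_cons, List.foldl_cons]
    have := ih (i + 1) (if ((bisectLeftB s (s[i] + arm) 0 s.length : Int) - i) > b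
        then (bisectLeftB s (s[i] + arm) 0 s.length : Int) - i else b)
      (by omega) (by omega) (by split_ifs <;> omega)
    push_cast at this ⊢
    rw [this]
    conv_rhs => rw [rmax]
    simp only [dif_pos hin]
    simp only [max_def]
    split_ifs <;> omega

-- ===== VERDICT (by name: the statement is the Claim_ definition above) =====
theorem findMaxSquare_spec : Claim_equal_findMaxSquare := by
  intro lst arm _
  unfold Spec_findMaxSquare findMaxSquare findMaxSquare_alt
  set s := PySem.List.sorted lst (fun x => x) with hsdef
  by_cases hg : s = [] ∨ arm < 1
  · simp only [if_pos hg]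
  · simp only [if_neg hg]
    have hs : s.Pairwise (· ≤ ·) := PySem.List.sorted_pairwise lst (fun x => x)
    have harm : 1 ≤ arm := by
      rcases not_or.mp hg with ⟨_, h2⟩; omega
    have hA := loop_eq hs harm (2 * s.length + 1) 0 0 0 (by omega) (by omega)
      (fun k hk _ _ => by omega) (by omega)
    have hB := fold_eq (s := s) arm s.length 0 0 (by omega) (by omega) le_rfl
    rw [List.drop_zero] at hB
    norm_num at hB hA
    rw [hA, hB]
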